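-- pv_equiv track=rewrite | github.com/J-siwon/Algorithm | 백준/PyPy3/백준/Bronze/25501. 재귀의 귀재/재귀의 귀재.py | countrecur
-- ===== SOURCE A (Python) =====
-- def countrecur(s, l, r, c):
--     if l >= r:
--         c+=1
--         return c
--     elif s[l] != s[r]:
--         c+=1
--         return c
--     else:
--         c+=1
--         return countrecur(s, l+1, r-1, c)
-- ===== SOURCE B (Python) =====
-- def countrecur(s, l, r, c):
--     # closed-form step count + single scan for the first mismatching pair
--     steps = max(0, (r - l + 1) // 2)
--     k = steps
--     for i in range(steps):
--         if s[l + i] != s[r - i]: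
--             k = i
--             break
--     return c + k + 1
-- ===== Notes on version B (the rewrite author's own statement) =====
-- stated objective: alternative
-- what changed: Replaces A's recursion by computing the number of comparison steps in closed form ((r-l+1)//2, clamped at 0) and doing a single flat scan for the first mismatching pair, returning c + mismatch_position + 1.
import Mathlib
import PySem

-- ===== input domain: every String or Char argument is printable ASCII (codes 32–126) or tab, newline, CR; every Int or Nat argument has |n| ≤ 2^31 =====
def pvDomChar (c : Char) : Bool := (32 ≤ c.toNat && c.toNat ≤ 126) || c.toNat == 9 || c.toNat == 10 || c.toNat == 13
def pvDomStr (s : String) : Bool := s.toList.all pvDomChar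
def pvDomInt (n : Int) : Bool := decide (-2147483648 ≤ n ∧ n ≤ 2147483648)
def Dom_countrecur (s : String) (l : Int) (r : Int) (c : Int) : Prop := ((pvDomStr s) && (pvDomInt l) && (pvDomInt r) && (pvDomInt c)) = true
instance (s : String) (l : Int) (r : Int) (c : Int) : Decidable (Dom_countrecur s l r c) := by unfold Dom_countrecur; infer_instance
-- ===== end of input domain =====

-- B replaces A's recursion by a closed-form step count plus one scan for the first mismatching pair (objective: alternative).


-- ===== PORT A =====
-- literal port of A's recursion; the `| _, _ => 0` branch is Python's IndexError (excluded by Pre_)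
def countrecur (s : String) (l : Int) (r : Int) (c : Int) : Int :=
  if l ≥ r then c + 1
  else
    match PySem.List.pyGet? s.toList l, PySem.List.pyGet? s.toList r with
    | some a, some b => if a ≠ b then c + 1 else countrecur s (l + 1) (r - 1) (c + 1)
    | _, _ => 0
termination_by (r - l).toNat
decreasing_by omega

-- ===== PORT B =====
-- the `for i in range(steps): if s[l+i] != s[r-i]: k=i; break` scan of Source B (fuel = remaining iterations);
-- the `| _, _ => some i` branch is Python's IndexError (excluded by Pre_)
def pvScan (s : String) (l : Int) (r : Int) : Nat → Int → Option Int
  | 0, _ => none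
  | n + 1, i =>
    match PySem.List.pyGet? s.toList (l + i) with
    | none => some i
    | some a =>
      match PySem.List.pyGet? s.toList (r - i) with
      | none => some i
      | some b => if a ≠ b then some i else pvScan s l r n (i + 1)

def countrecur_alt (s : String) (l : Int) (r : Int) (c : Int) : Int :=
  let steps : Int := max 0 (PySem.Int.floordiv (r - l + 1) 2)
  let k : Int := (pvScan s l r steps.toNat 0).getD steps
  c + k + 1

-- ===== PRECONDITION & SPEC =====
-- Pre_ excludes exactly the inputs on which A raises IndexError: l < r with an index outside [-len(s), len(s)).
def Pre_countrecur (s : String) (l : Int) (r : Int) (c : Int) : Prop :=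
  r ≤ l ∨ (-(s.toList.length : Int) ≤ l ∧ r < (s.toList.length : Int))
instance (s : String) (l : Int) (r : Int) (c : Int) : Decidable (Pre_countrecur s l r c) := by unfold Pre_countrecur; infer_instance
def pvWitness_countrecur : String × Int × Int × Int := ("abcba", 0, 4, 0)

def Spec_countrecur (s : String) (l : Int) (r : Int) (c : Int) (out : Int) : Prop := out = countrecur_alt s l r c
instance (s : String) (l : Int) (r : Int) (c : Int) (out : Int) : Decidable (Spec_countrecur s l r c out) := by unfold Spec_countrecur; infer_instance

-- ===== CLAIM (what is proved, stated in full; the proofs are below) =====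
def Claim_equal_countrecur : Prop := ∀ (s : String) (l : Int) (r : Int) (c : Int), Dom_countrecur s l r c → Pre_countrecur s l r c → Spec_countrecur s l r c (countrecur s l r c)

-- ===== LEMMAS AND PROOFS =====

-- when l ≥ r there are zero scan steps and B returns c + 1
lemma alt_base (s : String) (l r c : Int) (h : r ≤ l) : countrecur_alt s l r c = c + 1 := by
  have h2 : PySem.Int.floordiv (r - l + 1) 2 < 1 := by
    rw [PySem.Int.floordiv_lt_iff_lt_mul (by omega)]; omega
  have hs : max 0 (PySem.Int.floordiv (r - l + 1) 2) = 0 := by omega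
  unfold countrecur_alt
  rw [hs]
  simp [pvScan]

lemma steps_pos (l r : Int) (h : l < r) :
    1 ≤ PySem.Int.floordiv (r - l + 1) 2 := by
  rw [PySem.Int.le_floordiv_iff_mul_le (by omega)]; omega

lemma steps_succ (l r : Int) (h : l < r) :
    max 0 (PySem.Int.floordiv (r - l + 1) 2)
      = max 0 (PySem.Int.floordiv ((r - 1) - (l + 1) + 1) 2) + 1 := by
  set q := PySem.Int.floordiv (r - l - 1) 2 with hq
  have hb : q * 2 ≤ r - l - 1 ∧ r - l - 1 < (q + 1) * 2 := by
    constructor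
    · have := (PySem.Int.le_floordiv_iff_mul_le (a := r - l - 1) (b := 2) (q := q) (by omega)).mp (le_refl q)
      omega
    · have := (PySem.Int.floordiv_lt_iff_lt_mul (a := r - l - 1) (b := 2) (q := q + 1) (by omega)).mp (by omega)
      omega
  have hq0 : 0 ≤ q := by
    rw [hq, PySem.Int.le_floordiv_iff_mul_le (by omega)] <;> omega
  have h1 : PySem.Int.floordiv (r - l + 1) 2 = q + 1 := by
    rw [PySem.Int.floordiv_eq_iff_of_pos (by omega)]; omega
  have h2 : (r - 1) - (l + 1) + 1 = r - l - 1 := by ring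
  rw [h1, h2, ← hq]; omega

-- shifting the scan origin: pair (l+(i+1), r-(i+1)) is pair ((l+1)+i, (r-1)-i)
lemma pvScan_shift (s : String) (l r : Int) (n : Nat) :
    ∀ i : Int, pvScan s l r n (i + 1) = (pvScan s (l + 1) (r - 1) n i).map (· + 1) := by
  induction n with
  | zero => intro i; simp [pvScan]
  | succ n ih =>
    intro i
    have hl : l + (i + 1) = (l + 1) + i := by ring
    have hr : r - (i + 1) = (r - 1) - i := by ring
    simp only [pvScan, hl, hr]
    cases PySem.List.pyGet? s.toList ((l + 1) + i) with
    | none => simp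
    | some a =>
      cases PySem.List.pyGet? s.toList ((r - 1) - i) with
      | none => simp
      | some b =>
        by_cases hab : a = b
        · simp [hab, ih]
        · simp [hab]

lemma pyGet?_some_of_inrange (xs : List Char) (i : Int)
    (h1 : -(xs.length : Int) ≤ i) (h2 : i < (xs.length : Int)) :
    ∃ a, PySem.List.pyGet? xs i = some a := by
  cases hg : PySem.List.pyGet? xs i with
  | some a => exact ⟨a, rfl⟩
  | none =>
    have := (PySem.List.pyGet?_eq_none_iff (xs := xs) (i := i)).mp hg
    exact absurd (by exact ⟨h1, h2⟩) this

lemma main_lemma : ∀ (m : Nat) (s : String) (l r c : Int), (r - l).toNat ≤ m →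
    Pre_countrecur s l r c → countrecur s l r c = countrecur_alt s l r c := by
  intro m
  induction m with
  | zero =>
    intro s l r c hm _
    have h : r ≤ l := by omega
    rw [countrecur, if_pos (by omega), alt_base s l r c h]
  | succ m ih =>
    intro s l r c hm hpre
    by_cases hlr : l ≥ r
    · rw [countrecur, if_pos hlr, alt_base s l r c hlr]
    · have hlt : l < r := by omega
      have hbounds : -(s.toList.length : Int) ≤ l ∧ r < (s.toList.length : Int) := by
        rcases hpre with h | h
        · omega
        · exact h
      obtain ⟨a, ha⟩ := pyGet?_some_of_inrange s.toList l (by omega) (by omega)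
      obtain ⟨b, hb⟩ := pyGet?_some_of_inrange s.toList r (by omega) (by omega)
      have hsp := steps_pos l r hlt
      have hss := steps_succ l r hlt
      set st' : Int := max 0 (PySem.Int.floordiv ((r - 1) - (l + 1) + 1) 2) with hst'
      have hst'0 : 0 ≤ st' := by omega
      have hstep : max 0 (PySem.Int.floordiv (r - l + 1) 2) = st' + 1 := hss
      have htn : (max 0 (PySem.Int.floordiv (r - l + 1) 2)).toNat = st'.toNat + 1 := by omega
      by_cases hab : a = b
      · -- matching pair: A recurses; B's scan takes the step
        rw [countrecur, if_neg hlr, ha, hb]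
        simp only [hab, ne_eq, not_true_eq_false, if_false]
        rw [ih s (l + 1) (r - 1) (c + 1) (by omega)
            (Or.inr ⟨by omega, by omega⟩)]
        -- now show the two B-values agree
        show countrecur_alt s (l + 1) (r - 1) (c + 1) = countrecur_alt s l r c
        simp only [countrecur_alt, ← hst']
        rw [hstep, show (st' + 1).toNat = st'.toNat + 1 from by omega]
        rw [pvScan]
        have h0l : l + (0 : Int) = l := by ring
        have h0r : r - (0 : Int) = r := by ring
        rw [h0l, h0r, ha, hb]
        simp only [hab, ne_eq, not_true_eq_false, if_false]
        have h01 : (0 : Int) + 1 = 0 + 1 := rfl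
        rw [show ((0 : Int) + 1) = ((0 : Int) + 1) from rfl]
        rw [pvScan_shift s l r st'.toNat 0]
        cases pvScan s (l + 1) (r - 1) st'.toNat 0 with
        | none => simp; omega
        | some j => simp; omega
      · -- mismatching pair: both return c + 1
        rw [countrecur, if_neg hlr, ha, hb]
        simp only [ne_eq, hab, not_false_eq_true, if_true]
        simp only [countrecur_alt, htn]
        rw [pvScan]
        have h0l : l + (0 : Int) = l := by ring
        have h0r : r - (0 : Int) = r := by ring
        rw [h0l, h0r, ha, hb]
        simp only [ne_eq, hab, not_false_eq_true, if_true]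
        simp

-- ===== VERDICT (by name: the statement is the Claim_ definition above) =====
theorem countrecur_spec : Claim_equal_countrecur := by
  intro s l r c _ hpre
  exact main_lemma (r - l).toNat s l r c (le_refl _) hpre
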